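-- pv_equiv track=rewrite | github.com/ansible/mazer | ansible_galaxy/fetch/galaxy_url.py | select_repository_version
-- ===== SOURCE A (Python) =====
-- def select_repository_version(repoversions, version):
--     # repoversion's 'version' is 'not null' so should always exist
--     # however, the list of repoversions can be empty
--
--     # If the rest api returns a empty list for repo versions, return an
--     # empty dict for 'no version'
--     if not repoversions:
--         return {}
--
--     # we could build a map/dict first and search in it, but we only use this
--     # once, so this linear search is ok, since building the map would be that
--     # plus the getitem
--     results = [x for x in repoversions if x['version'] == version]
--
--     # no matching versions, return an empty dict
--     # TODO: raise VersionNotFoundError ? return some sort of NullRepositoryVersion instance?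
--     if not results:
--         return {}
--
--     # repoversions is uniq on (version, repo.id) so for any given repo,
--     # there should only be one result here
--     repoversion = results.pop()
--     return repoversion
-- ===== SOURCE B (Python) =====
-- def select_repository_version(repoversions, version):
--     index = {x['version']: x for x in repoversions}
--     return index.get(version, {})
-- ===== Notes on version B (the rewrite author's own statement) =====
-- stated objective: idiomatic
-- what changed: Replaces the empty-list guard, filter-comprehension and pop()-last with a one-pass dict index keyed by 'version' (later duplicates overwrite, matching pop()'s last-match) followed by a single .get(version, {}).
import Mathlib
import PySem

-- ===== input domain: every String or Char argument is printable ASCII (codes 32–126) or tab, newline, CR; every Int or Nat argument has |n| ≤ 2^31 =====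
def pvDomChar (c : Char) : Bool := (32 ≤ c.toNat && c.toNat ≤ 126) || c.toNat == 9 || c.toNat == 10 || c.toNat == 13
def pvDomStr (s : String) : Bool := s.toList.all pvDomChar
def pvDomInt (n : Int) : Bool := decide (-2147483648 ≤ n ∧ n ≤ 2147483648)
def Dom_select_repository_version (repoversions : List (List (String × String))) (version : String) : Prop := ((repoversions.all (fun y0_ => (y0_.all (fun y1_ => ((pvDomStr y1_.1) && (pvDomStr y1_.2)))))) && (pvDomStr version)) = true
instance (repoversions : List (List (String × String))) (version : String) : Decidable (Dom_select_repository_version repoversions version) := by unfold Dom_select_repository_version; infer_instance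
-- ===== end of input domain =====

-- ===== PORT A =====
-- B replaces filter-then-pop-last with a one-pass dict index keyed by 'version' plus a single lookup (idiomatic, same O(n)).
def select_repository_version (repoversions : List (List (String × String))) (version : String) : List (String × String) :=
  if repoversions = [] then []
  else
    -- results = [x for x in repoversions if x['version'] == version]
    let results := repoversions.filter (fun x => (PySem.Dict.mk x).get? "version" == some version)
    if results = [] then []
    else
      -- repoversion = results.pop()  (last element)
      match results.getLast? with
      | some r => r
      | none => []

-- ===== PORT B =====
-- index = {x['version']: x for x in repoversions}; return index.get(version, {})
-- (x['version'] ported as getD "version" ""; exact on Pre_, where every entry carries the key)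
def select_repository_version_alt (repoversions : List (List (String × String))) (version : String) : List (String × String) :=
  (repoversions.foldl (fun d x => d.insert ((PySem.Dict.mk x).getD "version" "") x)
    (PySem.Dict.empty : PySem.Dict String (List (String × String)))).getD version []

-- ===== PRECONDITION & SPEC =====
-- Pre_ excludes exactly the inputs where A raises KeyError: an entry without a 'version' key.
def Pre_select_repository_version (repoversions : List (List (String × String))) (version : String) : Prop :=
  ∀ x ∈ repoversions, (PySem.Dict.mk x).contains "version" = true
instance (repoversions : List (List (String × String))) (version : String) : Decidable (Pre_select_repository_version repoversions version) := by unfold Pre_select_repository_version; infer_instance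
def pvWitness_select_repository_version : (List (List (String × String))) × String :=
  ([[("version", "1.0"), ("name", "a")], [("version", "2.0")]], "2.0")

def Spec_select_repository_version (repoversions : List (List (String × String))) (version : String) (out : List (String × String)) : Prop := out = select_repository_version_alt repoversions version
instance (repoversions : List (List (String × String))) (version : String) (out : List (String × String)) : Decidable (Spec_select_repository_version repoversions version out) := by unfold Spec_select_repository_version; infer_instance

-- ===== CLAIM (what is proved, stated in full; the proofs are below) =====
def Claim_equal_select_repository_version : Prop := ∀ (repoversions : List (List (String × String))) (version : String), Dom_select_repository_version repoversions version → Pre_select_repository_version repoversions version → Spec_select_repository_version repoversions version (select_repository_version repoversions version)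

-- ===== LEMMAS AND PROOFS =====

theorem getLast?_cons_of_ne_nil {α : Type} (a : α) (l : List α) (h : l ≠ []) :
    (a :: l).getLast? = l.getLast? := by
  cases l with
  | nil => exact absurd rfl h
  | cons b t => simp [List.getLast?_cons_cons]

-- loop invariant: the dict index built over l, looked up at v, is the last filter match (or the accumulator's value)
theorem index_getD_eq_last_filter (l : List (List (String × String))) (v : String)
    (d : PySem.Dict String (List (String × String)))
    (h : ∀ x ∈ l, (PySem.Dict.mk x).contains "version" = true) :
    (l.foldl (fun d x => d.insert ((PySem.Dict.mk x).getD "version" "") x) d).getD v [] =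
      match (l.filter (fun x => (PySem.Dict.mk x).get? "version" == some v)).getLast? with
      | some r => r
      | none => d.getD v [] := by
  induction l generalizing d with
  | nil => simp
  | cons x t ih =>
    have hx : (PySem.Dict.mk x).contains "version" = true := h x (List.mem_cons_self ..)
    obtain ⟨s, hs⟩ : ∃ s, (PySem.Dict.mk x).get? "version" = some s := by
      cases hg : (PySem.Dict.mk x).get? "version" with
      | none =>
        rw [PySem.Dict.get?_eq_none_iff_contains] at hg
        simp [hg] at hx
      | some s => exact ⟨s, rfl⟩
    have hkey : (PySem.Dict.mk x).getD "version" "" = s := by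
      simp [PySem.Dict.getD_eq_get?_getD, hs]
    simp only [List.foldl_cons, List.filter_cons]
    rw [ih _ (fun y hy => h y (List.mem_cons_of_mem _ hy))]
    by_cases hmatch : s = v
    · -- predicate true: x is kept by the filter
      have hp : ((PySem.Dict.mk x).get? "version" == some v) = true := by
        simp [hs, hmatch]
      rw [hp]
      simp only [if_true]
      cases hlast : (t.filter (fun x => (PySem.Dict.mk x).get? "version" == some v)).getLast? with
      | some r =>
        have hne : (t.filter (fun x => (PySem.Dict.mk x).get? "version" == some v)) ≠ [] := by
          intro he; rw [he] at hlast; simp at hlast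
        rw [getLast?_cons_of_ne_nil _ _ hne, hlast]
      | none =>
        have he : (t.filter (fun x => (PySem.Dict.mk x).get? "version" == some v)) = [] :=
          List.getLast?_eq_none_iff.mp hlast
        rw [he]
        simp [hkey, hmatch, PySem.Dict.getD_insert_self]
    · -- predicate false: x is dropped by the filter and its index key ≠ v
      have hp : ((PySem.Dict.mk x).get? "version" == some v) = false := by
        simp [hs, hmatch]
      rw [hp]
      simp only [if_false, Bool.false_eq_true]
      cases hlast : (t.filter (fun x => (PySem.Dict.mk x).get? "version" == some v)).getLast? with
      | some r => rfl
      | none =>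
        have : (PySem.Dict.insert d ((PySem.Dict.mk x).getD "version" "") x).getD v [] = d.getD v [] := by
          rw [hkey, PySem.Dict.getD_insert_of_ne]
          exact fun he => hmatch he.symm
        simp [this]

-- ===== VERDICT (by name: the statement is the Claim_ definition above) =====
theorem select_repository_version_spec : Claim_equal_select_repository_version := by
  intro repoversions version _ hpre
  unfold Spec_select_repository_version select_repository_version select_repository_version_alt
  rw [index_getD_eq_last_filter repoversions version _ hpre]
  by_cases hnil : repoversions = []
  · subst hnil; simp
  · simp only [if_neg hnil]
    cases hlast : (repoversions.filter (fun x => (PySem.Dict.mk x).get? "version" == some version)).getLast? with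
    | some r =>
      have hne : (repoversions.filter (fun x => (PySem.Dict.mk x).get? "version" == some version)) ≠ [] := by
        intro he; rw [he] at hlast; simp at hlast
      simp only [if_neg hne]
    | none =>
      have he : (repoversions.filter (fun x => (PySem.Dict.mk x).get? "version" == some version)) = [] :=
        List.getLast?_eq_none_iff.mp hlast
      simp [he]
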